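-- pv_equiv track=rewrite | github.com/lizzard2003/CrackingTheCodePython | chap1.py | replace_spaces_with_percent20
-- ===== SOURCE A (Python) =====
-- def replace_spaces_with_percent20(input_str, true_length):
--     # Convert the string to a list of characters to modify in-place
--     char_list = list(input_str)
--
--     # Calculate the number of spaces in the true_length part of the string
--     space_count = char_list[:true_length].count(' ')
--
--     # Calculate the index to start adding characters from the end
--     new_index = true_length + space_count * 2
--
--     # Iterate through the string in reverse order and replace spaces with '%20'
--     for i in range(true_length - 1, -1, -1):
--         if char_list[i] == ' ':
--             char_list[new_index - 1] = '0'
--             char_list[new_index - 2] = '2'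
--             char_list[new_index - 3] = '%'
--             new_index -= 3
--         else:
--             char_list[new_index - 1] = char_list[i]
--             new_index -= 1
--
--     return ''.join(char_list)
-- ===== SOURCE B (Python) =====
-- def replace_spaces_with_percent20(input_str, true_length):
--     # Forward functional pass: expand the first true_length chars, keep the
--     # rest of the buffer beyond the expanded prefix unchanged.
--     if true_length <= 0:
--         return input_str
--     chars = list(input_str)
--     expanded = []
--     for c in chars[:true_length]:
--         expanded.extend(['%', '2', '0'] if c == ' ' else [c])
--     return ''.join(expanded + chars[len(expanded):])
-- ===== Notes on version B (the rewrite author's own statement) =====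
-- stated objective: simpler
-- what changed: A precomputes the space count and rewrites the buffer in place right-to-left with index arithmetic; B does one forward pass that functionally expands the first true_length characters and appends the untouched buffer tail.
-- crash fix: On inputs with true_length >= 1 whose expanded prefix does not fit the buffer (true_length + 2*spaces > len(input_str), including true_length > len), A raises IndexError while B returns the expanded prefix followed by the remaining tail. — e.g. on replace_spaces_with_percent20("a b", 4): A raises IndexError, B returns "a%20b"
import Mathlib
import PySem

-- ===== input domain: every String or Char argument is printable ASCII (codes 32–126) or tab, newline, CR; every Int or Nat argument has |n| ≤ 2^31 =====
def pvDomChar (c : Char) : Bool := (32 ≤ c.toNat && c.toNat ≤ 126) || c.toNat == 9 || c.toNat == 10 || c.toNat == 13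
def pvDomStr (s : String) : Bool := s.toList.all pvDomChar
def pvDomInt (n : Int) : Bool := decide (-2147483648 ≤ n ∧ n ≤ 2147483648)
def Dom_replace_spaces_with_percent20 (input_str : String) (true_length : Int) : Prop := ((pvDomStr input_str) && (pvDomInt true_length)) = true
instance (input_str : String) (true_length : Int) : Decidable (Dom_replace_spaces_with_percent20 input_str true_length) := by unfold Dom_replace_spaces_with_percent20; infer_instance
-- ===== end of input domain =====

-- B replaces A's reverse in-place index surgery by a forward functional expansion of
-- the prefix followed by the untouched buffer tail (simpler; same O(n) cost).

-- ===== PORT A =====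
-- one step of A's reverse for-loop: state = (char_list, new_index)
def pvStepA (st : List Char × Int) (i : Int) : List Char × Int :=
  if PySem.List.pyGetD st.1 i ' ' == ' ' then
    (PySem.List.pySetD (PySem.List.pySetD (PySem.List.pySetD st.1 (st.2 - 1) '0') (st.2 - 2) '2') (st.2 - 3) '%', st.2 - 3)
  else
    (PySem.List.pySetD st.1 (st.2 - 1) (PySem.List.pyGetD st.1 i ' '), st.2 - 1)

def replace_spaces_with_percent20 (input_str : String) (true_length : Int) : String :=
  let char_list := input_str.toList
  let space_count : Int := (PySem.List.count (PySem.List.slice char_list none (some true_length)) ' ' : Int)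
  let new_index := true_length + space_count * 2
  let final := (PySem.List.pyRange (true_length - 1) (-1) (-1)).foldl pvStepA (char_list, new_index)
  String.ofList final.1

-- ===== PORT B =====
def replace_spaces_with_percent20_alt (input_str : String) (true_length : Int) : String :=
  if true_length ≤ 0 then input_str
  else
    let chars := input_str.toList
    let expanded := (PySem.List.slice chars none (some true_length)).flatMap
      (fun c => if c == ' ' then ['%', '2', '0'] else [c])
    String.ofList (expanded ++ PySem.List.slice chars (some (expanded.length : Int)) none)

-- ===== PRECONDITION & SPEC =====
-- Pre_ excludes exactly the inputs where A raises IndexError: a positive true_length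
-- whose expanded prefix does not fit in the buffer (true_length > len(input_str), or
-- true_length + 2*spaces > len(input_str)); A returns normally on every other input.
def Pre_replace_spaces_with_percent20 (input_str : String) (true_length : Int) : Prop :=
  true_length ≤ 0 ∨
    (true_length ≤ (input_str.toList.length : Int) ∧
     true_length + 2 * ((input_str.toList.take true_length.toNat).count ' ' : Int) ≤ (input_str.toList.length : Int))
instance (input_str : String) (true_length : Int) : Decidable (Pre_replace_spaces_with_percent20 input_str true_length) := by unfold Pre_replace_spaces_with_percent20; infer_instance

def pvWitness_replace_spaces_with_percent20 : String × Int := ("a b  ", 3)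

-- On inputs with 1 ≤ true_length whose expanded prefix exceeds the buffer, A raises
-- IndexError while B returns the expanded prefix followed by the remaining tail.
def Raises_replace_spaces_with_percent20 (input_str : String) (true_length : Int) : Prop :=
  1 ≤ true_length ∧
    (input_str.toList.length : Int) < true_length + 2 * ((input_str.toList.take true_length.toNat).count ' ' : Int)
instance (input_str : String) (true_length : Int) : Decidable (Raises_replace_spaces_with_percent20 input_str true_length) := by unfold Raises_replace_spaces_with_percent20; infer_instance
def pvRaiseWitness_replace_spaces_with_percent20 : String × Int := ("a b", 4)
def pvRaiseWitnessOut_replace_spaces_with_percent20 : String := "a%20b"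

def Spec_replace_spaces_with_percent20 (input_str : String) (true_length : Int) (out : String) : Prop := out = replace_spaces_with_percent20_alt input_str true_length
instance (input_str : String) (true_length : Int) (out : String) : Decidable (Spec_replace_spaces_with_percent20 input_str true_length out) := by unfold Spec_replace_spaces_with_percent20; infer_instance

-- ===== CLAIM (what is proved, stated in full; the proofs are below) =====
def Claim_equal_replace_spaces_with_percent20 : Prop := ∀ (input_str : String) (true_length : Int), Dom_replace_spaces_with_percent20 input_str true_length → Pre_replace_spaces_with_percent20 input_str true_length → Spec_replace_spaces_with_percent20 input_str true_length (replace_spaces_with_percent20 input_str true_length)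

def Claim_raises_replace_spaces_with_percent20 : Prop := (∀ (input_str : String) (true_length : Int), Dom_replace_spaces_with_percent20 input_str true_length → Raises_replace_spaces_with_percent20 input_str true_length → ¬ Pre_replace_spaces_with_percent20 input_str true_length) ∧ (Dom_replace_spaces_with_percent20 (pvRaiseWitness_replace_spaces_with_percent20.1) (pvRaiseWitness_replace_spaces_with_percent20.2) ∧ Raises_replace_spaces_with_percent20 (pvRaiseWitness_replace_spaces_with_percent20.1) (pvRaiseWitness_replace_spaces_with_percent20.2) ∧ replace_spaces_with_percent20_alt (pvRaiseWitness_replace_spaces_with_percent20.1) (pvRaiseWitness_replace_spaces_with_percent20.2) = pvRaiseWitnessOut_replace_spaces_with_percent20)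

-- ===== LEMMAS AND PROOFS =====

theorem pvDropSet {α : Type} (l : List α) (k : Nat) (a : α) (h : k < l.length) :
    (l.set k a).drop k = a :: l.drop (k + 1) := by
  rw [List.drop_set, if_neg (by omega), List.drop_eq_getElem_cons h, Nat.sub_self, List.set_cons_zero]

theorem pvTakeSet {α : Type} (l : List α) (k i : Nat) (a : α) (h : k ≤ i) :
    (l.set i a).take k = l.take k := by
  rw [List.take_set, List.set_eq_of_length_le (by simp; omega)]

-- length of the expanded prefix
theorem pvLenExpand (l : List Char) :
    (l.flatMap (fun c => if c == ' ' then ['%', '2', '0'] else [c])).length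
      = l.length + 2 * l.count ' ' := by
  induction l with
  | nil => simp
  | cons c l ih =>
    rw [List.flatMap_cons, List.length_append, ih, List.count_cons]
    by_cases hc : c = ' ' <;> simp [hc] <;> omega

-- A's reverse loop, run from index n-1 down to 0 with new_index = n + 2*spaces(take n),
-- rewrites the first n + 2*spaces positions with the expansion and keeps the rest.
theorem pvLoopA (n : Nat) : ∀ (cl : List Char),
    n + 2 * ((cl.take n).count ' ') ≤ cl.length →
    ((PySem.List.pyRange ((n : Int) - 1) (-1) (-1)).foldl pvStepA
        (cl, (n : Int) + (((cl.take n).count ' ' : Nat) : Int) * 2)).1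
      = (cl.take n).flatMap (fun c => if c == ' ' then ['%', '2', '0'] else [c])
          ++ cl.drop (n + 2 * (cl.take n).count ' ') := by
  induction n with
  | zero =>
    intro cl _
    rw [PySem.List.pyRange_neg_one_eq_nil (by omega)]
    simp
  | succ n ih =>
    intro cl h
    have hn : n < cl.length := by omega
    have htake : cl.take (n+1) = cl.take n ++ [cl[n]] := by
      rw [List.take_add_one, List.getElem?_eq_getElem hn]; rfl
    set sc := (cl.take n).count ' ' with hsc
    have hrange : ((n + 1 : Nat) : Int) - 1 = (n : Int) := by push_cast; ring
    rw [hrange, PySem.List.pyRange_neg_one_cons (by omega), List.foldl_cons]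
    have hread : PySem.List.pyGetD cl (n : Int) ' ' = cl[n] := by
      rw [PySem.List.pyGetD_eq_getElem cl ' ' (by omega) (by exact_mod_cast hn)]
      simp
    by_cases hsp : cl[n] = ' '
    · -- space branch
      have hcnt : (cl.take (n+1)).count ' ' = sc + 1 := by
        rw [htake, List.count_append, hsc]; simp [hsp]
      have hlen : n + 2 * sc + 3 ≤ cl.length := by rw [hcnt] at h; omega
      have e1 : ((n + 1 : Nat) : Int) + (((cl.take (n+1)).count ' ' : Nat) : Int) * 2 - 1
          = ((n + 2 * sc + 2 : Nat) : Int) := by rw [hcnt]; push_cast; ring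
      have e2 : ((n + 1 : Nat) : Int) + (((cl.take (n+1)).count ' ' : Nat) : Int) * 2 - 2
          = ((n + 2 * sc + 1 : Nat) : Int) := by rw [hcnt]; push_cast; ring
      have e3 : ((n + 1 : Nat) : Int) + (((cl.take (n+1)).count ' ' : Nat) : Int) * 2 - 3
          = ((n + 2 * sc : Nat) : Int) := by rw [hcnt]; push_cast; ring
      have hstep : pvStepA (cl, ((n + 1 : Nat) : Int) + (((cl.take (n+1)).count ' ' : Nat) : Int) * 2) (n : Int)
          = (((cl.set (n + 2*sc + 2) '0').set (n + 2*sc + 1) '2').set (n + 2*sc) '%',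
             ((n + 2 * sc : Nat) : Int)) := by
        unfold pvStepA
        rw [if_pos (by simp [hread, hsp])]
        rw [e1, PySem.List.pySetD_natCast, e2, PySem.List.pySetD_natCast, e3, PySem.List.pySetD_natCast]
      rw [hstep]
      set cl' := ((cl.set (n + 2*sc + 2) '0').set (n + 2*sc + 1) '2').set (n + 2*sc) '%' with hcl'
      have htk : cl'.take n = cl.take n := by
        rw [hcl', pvTakeSet _ _ _ _ (by omega), pvTakeSet _ _ _ _ (by omega),
            pvTakeSet _ _ _ _ (by omega)]
      have hcnt' : (cl'.take n).count ' ' = sc := by rw [htk]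
      have hlen' : cl'.length = cl.length := by simp [hcl']
      have e4 : ((n + 2 * sc : Nat) : Int) = (n : Int) + ((((cl'.take n).count ' ' : Nat)) : Int) * 2 := by
        rw [hcnt']; push_cast; ring
      rw [e4, ih cl' (by rw [hcnt', hlen']; omega)]
      have hdrop : cl'.drop (n + 2 * sc) = '%' :: '2' :: '0' :: cl.drop (n + 2 * sc + 3) := by
        rw [hcl', pvDropSet _ _ _ (by simp; omega),
            pvDropSet _ _ _ (by simp; omega),
            pvDropSet _ _ _ (by omega)]
      rw [hcnt', htk, hdrop, htake, List.flatMap_append]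
      have hone : List.count ' ' (List.take n cl ++ [cl[n]]) = sc + 1 := by
        rw [List.count_append, hsc]; simp [hsp]
      rw [hone, (by omega : n + 1 + 2 * (sc + 1) = n + 2 * sc + 3)]
      simp [hsp]
    · -- non-space branch
      have hcnt : (cl.take (n+1)).count ' ' = sc := by
        rw [htake, List.count_append, hsc]; simp [hsp]
      have hlen : n + 2 * sc + 1 ≤ cl.length := by rw [hcnt] at h; omega
      have e1 : ((n + 1 : Nat) : Int) + (((cl.take (n+1)).count ' ' : Nat) : Int) * 2 - 1
          = ((n + 2 * sc : Nat) : Int) := by rw [hcnt]; push_cast; ring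
      have hstep : pvStepA (cl, ((n + 1 : Nat) : Int) + (((cl.take (n+1)).count ' ' : Nat) : Int) * 2) (n : Int)
          = (cl.set (n + 2*sc) cl[n], ((n + 2 * sc : Nat) : Int)) := by
        unfold pvStepA
        rw [if_neg (by simp [hread, hsp])]
        rw [e1, PySem.List.pySetD_natCast, hread]
      rw [hstep]
      set cl' := cl.set (n + 2*sc) cl[n] with hcl'
      have htk : cl'.take n = cl.take n := by
        rw [hcl', pvTakeSet _ _ _ _ (by omega)]
      have hcnt' : (cl'.take n).count ' ' = sc := by rw [htk]
      have e4 : ((n + 2 * sc : Nat) : Int) = (n : Int) + ((((cl'.take n).count ' ' : Nat)) : Int) * 2 := by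
        rw [hcnt']; push_cast; ring
      rw [e4, ih cl' (by rw [hcnt']; simp [hcl']; omega)]
      have hdrop : cl'.drop (n + 2 * sc) = cl[n] :: cl.drop (n + 2 * sc + 1) := by
        rw [hcl', pvDropSet _ _ _ (by omega)]
      rw [hcnt', htk, hdrop, htake, List.flatMap_append]
      have hone : List.count ' ' (List.take n cl ++ [cl[n]]) = sc := by
        rw [List.count_append, hsc]; simp [hsp]
      rw [hone, (by omega : n + 1 + 2 * sc = n + 2 * sc + 1)]
      simp [hsp]

-- ===== VERDICT (by name: the statement is the Claim_ definition above) =====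
theorem replace_spaces_with_percent20_spec : Claim_equal_replace_spaces_with_percent20 := by
  intro s tl _ hpre
  unfold Spec_replace_spaces_with_percent20 replace_spaces_with_percent20 replace_spaces_with_percent20_alt
  by_cases htl : tl ≤ 0
  · rw [if_pos htl]
    simp only []
    rw [PySem.List.pyRange_neg_one_eq_nil (by omega)]
    simp [String.ofList_toList]
  · rw [if_neg htl]
    obtain ⟨n, rfl⟩ : ∃ n : Nat, tl = (n : Int) := ⟨tl.toNat, (Int.toNat_of_nonneg (by omega)).symm⟩
    rcases hpre with h | ⟨h1, h2⟩
    · omega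
    simp only []
    rw [PySem.List.slice_to_natCast, PySem.List.count_eq]
    have hle : n ≤ s.toList.length := by exact_mod_cast h1
    rw [Int.toNat_natCast] at h2
    have hbound : n + 2 * ((s.toList.take n).count ' ') ≤ s.toList.length := by
      omega
    rw [pvLoopA n s.toList hbound]
    have hlenexp : ((s.toList.take n).flatMap
        (fun c => if c == ' ' then ['%', '2', '0'] else [c])).length
        = n + 2 * (s.toList.take n).count ' ' := by
      rw [pvLenExpand, List.length_take, Nat.min_eq_left hle]
    rw [hlenexp, PySem.List.slice_from_natCast]

theorem replace_spaces_with_percent20_raises : Claim_raises_replace_spaces_with_percent20 := by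
  unfold Claim_raises_replace_spaces_with_percent20
  refine ⟨?_, by decide⟩
  intro s tl _ hr
  unfold Raises_replace_spaces_with_percent20 at hr
  unfold Pre_replace_spaces_with_percent20
  omega

-- self-check: the raise witness indeed lies outside Pre_ (via the first half of the raises claim)
theorem pvRaiseWitnessOutsidePre_ok :
    ¬ Pre_replace_spaces_with_percent20 (pvRaiseWitness_replace_spaces_with_percent20.1) (pvRaiseWitness_replace_spaces_with_percent20.2) :=
  replace_spaces_with_percent20_raises.1 _ _ (by decide) (by decide)
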